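-- pv_equiv track=rewrite | github.com/LanzFriszt/Text-modifier | Function Objects.py | MakeRunOn
-- ===== SOURCE A (Python) =====
-- def MakeRunOn(text):
--     for char in ",.:;":
--         if char in text:
--             text = text.replace(char," and")
--     for char in "/":
--         if char in text:
--             text = text.replace(char, " and ")
--     return text.lower()
-- ===== SOURCE B (Python) =====
-- def MakeRunOn(text):
--     repl = {',': ' and', '.': ' and', ':': ' and', ';': ' and', '/': ' and '}
--     parts = []
--     for ch in text:
--         parts.append(repl.get(ch, ch))
--     return ''.join(parts).lower()
-- ===== Notes on version B (the rewrite author's own statement) =====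
-- stated objective: idiomatic
-- what changed: A makes five sequential full-text replace passes (one per punctuation character); B builds the result in a single pass over the text using a translation dict mapping each punctuation character to its replacement, then lowercases once.
import Mathlib
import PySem

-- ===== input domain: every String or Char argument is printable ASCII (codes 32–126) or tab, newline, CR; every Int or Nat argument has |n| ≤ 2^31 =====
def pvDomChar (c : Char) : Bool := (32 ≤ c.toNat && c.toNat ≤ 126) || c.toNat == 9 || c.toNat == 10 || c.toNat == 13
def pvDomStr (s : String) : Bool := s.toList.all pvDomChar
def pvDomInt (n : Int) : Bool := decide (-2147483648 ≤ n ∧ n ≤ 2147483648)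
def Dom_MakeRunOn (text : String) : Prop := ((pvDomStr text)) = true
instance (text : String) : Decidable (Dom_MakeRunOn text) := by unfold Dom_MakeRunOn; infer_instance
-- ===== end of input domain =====

-- B replaces A's five sequential full-text replace passes by one table-driven pass
-- (a dict lookup per character), building the output once; objective: idiomatic, same O(n) cost.

-- ===== PORT A =====
def MakeRunOn (text : String) : String :=
  let t1 := (",.:;".toList).foldl
    (fun t c => if PySem.Str.isIn (String.ofList [c]) t
                then PySem.Str.replace t (String.ofList [c]) " and" else t) text
  let t2 := ("/".toList).foldl
    (fun t c => if PySem.Str.isIn (String.ofList [c]) t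
                then PySem.Str.replace t (String.ofList [c]) " and " else t) t1
  PySem.Str.lower t2

-- ===== PORT B =====
def MakeRunOn_alt (text : String) : String :=
  let repl : PySem.Dict Char String :=
    ((((PySem.Dict.empty.insert ',' " and").insert '.' " and").insert ':' " and").insert ';' " and").insert '/' " and "
  let parts := text.toList.foldl (fun ps ch => ps ++ [repl.getD ch (String.ofList [ch])]) ([] : List String)
  PySem.Str.lower (PySem.Str.join "" parts)

-- ===== PRECONDITION & SPEC =====
def Spec_MakeRunOn (text : String) (out : String) : Prop := out = MakeRunOn_alt text
instance (text : String) (out : String) : Decidable (Spec_MakeRunOn text out) := by unfold Spec_MakeRunOn; infer_instance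

-- ===== CLAIM (what is proved, stated in full; the proofs are below) =====
def Claim_equal_MakeRunOn : Prop := ∀ (text : String), Dom_MakeRunOn text → Spec_MakeRunOn text (MakeRunOn text)

-- ===== LEMMAS AND PROOFS =====

-- the per-character substitution both programs implement
def gmap (x : Char) : List Char :=
  if x = ',' then " and".toList else if x = '.' then " and".toList else
  if x = ':' then " and".toList else if x = ';' then " and".toList else
  if x = '/' then " and ".toList else [x]

-- replace with a single-char pattern is a per-character flatMap
theorem go_single (c : Char) (new : List Char) :
    ∀ (l : List Char) (fuel : Nat) (acc : List Char), l.length ≤ fuel →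
    PySem.Chars.replace.go [c] new fuel l acc
      = acc.reverse ++ l.flatMap (fun x => if x = c then new else [x]) := by
  intro l
  induction l with
  | nil =>
    intro fuel acc _
    cases fuel <;> simp [PySem.Chars.replace.go]
  | cons x t ih =>
    intro fuel acc h
    cases fuel with
    | zero => simp at h
    | succ n =>
      rw [PySem.Chars.replace.go]
      by_cases hx : x = c
      · subst hx
        simp only [List.isPrefixOf, BEq.rfl, Bool.true_and, if_true, List.length_cons,
          List.length_nil, Nat.zero_add, List.drop_succ_cons, List.drop_zero]
        rw [ih n (new.reverse ++ acc) (by simpa using Nat.le_of_succ_le_succ h)]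
        simp
      · have : [c].isPrefixOf (x :: t) = false := by
          simp [List.isPrefixOf]; exact fun h' => hx h'.symm
        rw [this]
        simp only [Bool.false_eq_true, if_false]
        rw [ih n (x :: acc) (by simpa using Nat.le_of_succ_le_succ h)]
        simp [hx]

theorem replace_single (s : List Char) (c : Char) (new : List Char) :
    PySem.Chars.replace s [c] new = s.flatMap (fun x => if x = c then new else [x]) := by
  rw [PySem.Chars.replace]
  simp only [List.isEmpty, Bool.false_eq_true, if_false]
  exact go_single c new s s.length [] (le_refl _)

theorem singleton_infix_iff (c : Char) (s : List Char) : ([c] <:+: s) ↔ c ∈ s := by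
  constructor
  · rintro ⟨l, r, h⟩; subst h; simp
  · intro h
    obtain ⟨l, r, h⟩ := List.append_of_mem h
    exact ⟨l, r, by simp [h]⟩

-- one guarded replace pass of A, as a flatMap (the guard is redundant)
theorem step_toList (t : String) (c : Char) (new : String) :
    (if PySem.Str.isIn (String.ofList [c]) t
     then PySem.Str.replace t (String.ofList [c]) new else t).toList
      = t.toList.flatMap (fun x => if x = c then new.toList else [x]) := by
  by_cases h : PySem.Str.isIn (String.ofList [c]) t = true
  · rw [if_pos h]
    simp [replace_single]
  · rw [if_neg h]
    have hf : PySem.Chars.isIn [c] t.toList = false := by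
      have := (Bool.not_eq_true _).mp h
      simpa using this
    have hni : c ∉ t.toList := fun hc =>
      (PySem.Chars.isIn_eq_false_iff [c] t.toList).mp hf ((singleton_infix_iff c t.toList).mpr hc)
    have : ∀ x ∈ t.toList, (fun x => if x = c then new.toList else [x]) x = [x] := by
      intro x hx
      have : x ≠ c := fun e => hni (e ▸ hx)
      simp [this]
    calc t.toList = t.toList.flatMap (fun x => [x]) := by simp
      _ = _ := (List.flatMap_congr (fun x hx => (this x hx).symm))

-- the four+one flatMap passes compose to the single table gmap
theorem chain (s : List Char) :
    (((((s.flatMap (fun x => if x = ',' then " and".toList else [x])).flatMap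
        (fun x => if x = '.' then " and".toList else [x])).flatMap
        (fun x => if x = ':' then " and".toList else [x])).flatMap
        (fun x => if x = ';' then " and".toList else [x])).flatMap
        (fun x => if x = '/' then " and ".toList else [x]))
      = s.flatMap gmap := by
  simp only [List.flatMap_assoc]
  induction s with
  | nil => simp
  | cons x t ih =>
    simp only [List.flatMap_cons] at *
    rw [ih]
    congr 1
    by_cases h1 : x = ','
    · subst h1; decide
    by_cases h2 : x = '.'
    · subst h2; decide
    by_cases h3 : x = ':'
    · subst h3; decide
    by_cases h4 : x = ';'
    · subst h4; decide
    by_cases h5 : x = '/'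
    · subst h5; decide
    simp [gmap, h1, h2, h3, h4, h5]

theorem A_toList (text : String) :
    (MakeRunOn text).toList = PySem.Chars.lower (text.toList.flatMap gmap) := by
  unfold MakeRunOn
  rw [show (",.:;".toList) = [',', '.', ':', ';'] from rfl,
      show ("/".toList) = ['/'] from rfl]
  simp only [List.foldl_cons, List.foldl_nil]
  rw [PySem.Str.toList_lower]
  rw [step_toList, step_toList, step_toList, step_toList, step_toList, chain]

theorem foldl_app (h : Char → String) : ∀ (l : List Char) (acc : List String),
    l.foldl (fun ps x => ps ++ [h x]) acc = acc ++ l.map h := by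
  intro l
  induction l with
  | nil => simp
  | cons x t ih => intro acc; simp [List.foldl_cons, ih]

theorem inter_nil : ∀ (parts : List (List Char)), PySem.Chars.join ([]:List Char) parts = parts.flatten := by
  intro parts
  simp only [PySem.Chars.join, List.intercalate]
  induction parts with
  | nil => simp
  | cons x t ih =>
    cases t with
    | nil => simp
    | cons y u => simpa using ih

theorem B_toList (text : String) :
    (MakeRunOn_alt text).toList = PySem.Chars.lower (text.toList.flatMap gmap) := by
  unfold MakeRunOn_alt
  rw [PySem.Str.toList_lower]
  congr 1
  rw [PySem.Str.toList_join, foldl_app]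
  simp only [List.nil_append, List.map_map]
  rw [show ("".toList) = ([] : List Char) from rfl, inter_nil]
  induction text.toList with
  | nil => simp
  | cons x t ih =>
    simp only [List.map_cons, List.flatten_cons, List.flatMap_cons]
    rw [ih]
    congr 1
    by_cases h1 : x = ','
    · subst h1; decide
    by_cases h2 : x = '.'
    · subst h2; decide
    by_cases h3 : x = ':'
    · subst h3; decide
    by_cases h4 : x = ';'
    · subst h4; decide
    by_cases h5 : x = '/'
    · subst h5; decide
    simp only [Function.comp]
    rw [PySem.Dict.getD_insert, PySem.Dict.getD_insert, PySem.Dict.getD_insert,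
        PySem.Dict.getD_insert, PySem.Dict.getD_insert]
    simp [h1, h2, h3, h4, h5, gmap, PySem.Dict.getD_empty]

-- ===== VERDICT (by name: the statement is the Claim_ definition above) =====
theorem MakeRunOn_spec : Claim_equal_MakeRunOn := by
  intro text _
  unfold Spec_MakeRunOn
  apply String.toList_inj.mp
  rw [A_toList, B_toList]
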